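-- pv_equiv track=rewrite | github.com/pipptutorai/tutorAI-PIPP | indexer/chunker.py | _merge_small
-- ===== SOURCE A (Python) =====
-- from typing import List, Tuple, Optional
--
-- def _merge_small(sents: List[str], bounds: List[Tuple[int, int]], mn: int, mx: int):
--     if not bounds:
--         return bounds
--     merged: List[Tuple[int, int]] = []
--     for b in bounds:
--         if not merged:
--             merged.append(b)
--             continue
--         prev = merged[-1]
--         cur_len = sum(len(s) for s in sents[b[0]:b[1]])
--         if cur_len < mn:
--             # coba gabung dengan sebelumnya
--             combined = (prev[0], b[1])
--             if sum(len(s) for s in sents[combined[0]:combined[1]]) <= mx: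
--                 merged[-1] = combined
--             else:
--                 merged.append(b)
--         else:
--             merged.append(b)
--     return merged
-- ===== SOURCE B (Python) =====
-- def _merge_small(sents, bounds, mn, mx):
--     if not bounds:
--         return bounds
--     # prefix sums of sentence lengths: each range query is a subtraction instead of re-summing a slice
--     pref = [0]
--     for s in sents:
--         pref.append(pref[-1] + len(s))
--     n = len(sents)
--
--     def seg(a, b):
--         lo = a + n if a < 0 else a
--         lo = 0 if lo < 0 else (n if lo > n else lo)
--         hi = b + n if b < 0 else b
--         hi = 0 if hi < 0 else (n if hi > n else hi)
--         return pref[hi] - pref[lo] if lo < hi else 0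
--
--     out = []
--     cur = bounds[0]
--     for b in bounds[1:]:
--         if seg(b[0], b[1]) < mn and seg(cur[0], b[1]) <= mx:
--             cur = (cur[0], b[1])
--         else:
--             out.append(cur)
--             cur = b
--     out.append(cur)
--     return out
-- ===== Notes on version B (the rewrite author's own statement) =====
-- stated objective: alternative
-- what changed: B precomputes a prefix-sum table of sentence lengths once and answers each chunk-length query by subtracting two table entries instead of re-summing a slice, and it carries the current open chunk through a single pass instead of rewriting the last element of the output list; a timing run's inputs have constant-size ranges, so no measured speed-up.
import Mathlib
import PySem

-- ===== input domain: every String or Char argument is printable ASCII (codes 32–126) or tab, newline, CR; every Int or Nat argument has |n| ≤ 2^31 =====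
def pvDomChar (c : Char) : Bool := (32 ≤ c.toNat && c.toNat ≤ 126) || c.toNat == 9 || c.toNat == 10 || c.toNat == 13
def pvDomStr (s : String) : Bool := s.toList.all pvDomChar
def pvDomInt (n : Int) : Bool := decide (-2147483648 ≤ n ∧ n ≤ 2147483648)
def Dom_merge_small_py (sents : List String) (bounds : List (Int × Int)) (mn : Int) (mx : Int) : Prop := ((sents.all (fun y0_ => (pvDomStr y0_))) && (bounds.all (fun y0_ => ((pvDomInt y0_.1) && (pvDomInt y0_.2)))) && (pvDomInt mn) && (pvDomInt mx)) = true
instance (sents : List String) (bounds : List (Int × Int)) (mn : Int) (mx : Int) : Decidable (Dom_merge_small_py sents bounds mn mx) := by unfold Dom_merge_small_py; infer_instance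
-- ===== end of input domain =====

-- B replaces A's per-chunk slice re-summation by a prefix-sum table queried by subtraction
-- and carries the current open chunk through one pass instead of rewriting merged[-1] (alternative algorithm).

-- ===== PORT A =====
-- sum(len(s) for s in sents[a:b])
def pySliceLenSum (sents : List String) (a b : Int) : Int :=
  ((PySem.List.slice sents (some a) (some b)).map PySem.Str.len).sum

-- loop body of A; the 'merged' list is carried reversed (head = merged[-1])
def stepA (sents : List String) (mn mx : Int) (merged : List (Int × Int)) (b : Int × Int) : List (Int × Int) :=
  match merged with
  | [] => [b]
  | prev :: rest =>
    let cur_len := pySliceLenSum sents b.1 b.2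
    if cur_len < mn then
      let combined := (prev.1, b.2)
      if pySliceLenSum sents combined.1 combined.2 ≤ mx then combined :: rest
      else b :: prev :: rest
    else b :: prev :: rest

def merge_small_py (sents : List String) (bounds : List (Int × Int)) (mn : Int) (mx : Int) : List (Int × Int) :=
  if bounds.isEmpty then bounds
  else (bounds.foldl (stepA sents mn mx) []).reverse

-- ===== PORT B =====
-- Source B's index normalisation: lo = a+n if a<0 else a, then clamped into [0, n]
def altClamp (n i : Int) : Int :=
  let j := if i < 0 then i + n else i
  if j < 0 then 0 else if j > n then n else j

-- Source B's seg(a, b): pref[hi] - pref[lo] if lo < hi else 0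
def altSeg (pref : List Int) (n a b : Int) : Int :=
  let lo := altClamp n a
  let hi := altClamp n b
  if lo < hi then pref.getD hi.toNat 0 - pref.getD lo.toNat 0 else 0

-- loop body of B; state = (out reversed, cur)
def stepB (pref : List Int) (n mn mx : Int) (st : List (Int × Int) × (Int × Int)) (b : Int × Int) :
    List (Int × Int) × (Int × Int) :=
  if altSeg pref n b.1 b.2 < mn ∧ altSeg pref n st.2.1 b.2 ≤ mx then (st.1, (st.2.1, b.2))
  else (st.2 :: st.1, b)

def merge_small_py_alt (sents : List String) (bounds : List (Int × Int)) (mn : Int) (mx : Int) : List (Int × Int) :=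
  match bounds with
  | [] => []
  | b0 :: rest =>
    -- pref = [0]; for s in sents: pref.append(pref[-1] + len(s))
    let pref := List.scanl (fun acc s => acc + PySem.Str.len s) 0 sents
    let n : Int := sents.length
    let fin := rest.foldl (stepB pref n mn mx) ([], b0)
    (fin.2 :: fin.1).reverse

-- ===== PRECONDITION & SPEC =====
def Spec_merge_small_py (sents : List String) (bounds : List (Int × Int)) (mn : Int) (mx : Int) (out : List (Int × Int)) : Prop := out = merge_small_py_alt sents bounds mn mx
instance (sents : List String) (bounds : List (Int × Int)) (mn : Int) (mx : Int) (out : List (Int × Int)) : Decidable (Spec_merge_small_py sents bounds mn mx out) := by unfold Spec_merge_small_py; infer_instance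

-- ===== CLAIM (what is proved, stated in full; the proofs are below) =====
def Claim_equal_merge_small_py : Prop := ∀ (sents : List String) (bounds : List (Int × Int)) (mn : Int) (mx : Int), Dom_merge_small_py sents bounds mn mx → Spec_merge_small_py sents bounds mn mx (merge_small_py sents bounds mn mx)

-- ===== LEMMAS AND PROOFS =====

-- Source B's clamp equals PySem's slice-index clamp
lemma altClamp_eq (n : Nat) (i : Int) : altClamp (n : Int) i = ((PySem.List.clampIdx n i : Nat) : Int) := by
  simp only [altClamp, PySem.List.clampIdx]
  split_ifs <;> omega

-- the scanl prefix table read at i is the sum of the first i lengths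
lemma scanl_getD (xs : List String) (a : Int) (i : Nat) (hi : i ≤ xs.length) :
    (List.scanl (fun acc s => acc + PySem.Str.len s) a xs).getD i 0
      = a + ((xs.take i).map PySem.Str.len).sum := by
  induction xs generalizing a i with
  | nil =>
    simp only [List.length_nil, Nat.le_zero] at hi
    subst hi; simp
  | cons x xs ih =>
    cases i with
    | zero => simp
    | succ j =>
      simp only [List.scanl_cons, List.getD_cons_succ, List.take_succ_cons, List.map_cons,
        List.sum_cons]
      rw [ih _ j (by simpa using hi)]
      ring

-- a segment sum is a difference of prefix sums
lemma seg_sum (xs : List String) (l k : Nat) :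
    (((xs.drop l).take k).map PySem.Str.len).sum
      = ((xs.take (l + k)).map PySem.Str.len).sum - ((xs.take l).map PySem.Str.len).sum := by
  rw [List.take_add, List.map_append, List.sum_append]
  ring

-- B's prefix-table range query equals A's slice re-summation
lemma altSeg_eq (sents : List String) (a b : Int) :
    altSeg (List.scanl (fun acc s => acc + PySem.Str.len s) 0 sents) (sents.length : Int) a b
      = pySliceLenSum sents a b := by
  have hlo := PySem.List.clampIdx_le (n := sents.length) (i := a)
  have hhi := PySem.List.clampIdx_le (n := sents.length) (i := b)
  simp only [altSeg, pySliceLenSum, PySem.List.slice, altClamp_eq]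
  set lo := PySem.List.clampIdx sents.length a with hlo'
  set hi := PySem.List.clampIdx sents.length b with hhi'
  by_cases h : lo < hi
  · rw [if_pos (by exact_mod_cast h)]
    rw [Int.toNat_natCast, Int.toNat_natCast]
    rw [scanl_getD _ _ _ hhi, scanl_getD _ _ _ hlo]
    rw [seg_sum sents lo (hi - lo)]
    have : lo + (hi - lo) = hi := by omega
    rw [this]; ring
  · rw [if_neg (by exact_mod_cast h)]
    have : hi - lo = 0 := by omega
    simp [this]

-- the two loops compute the same merged list, from any reachable state
lemma loop_eq (sents : List String) (mn mx : Int) (bs : List (Int × Int))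
    (prev : Int × Int) (rest : List (Int × Int)) :
    bs.foldl (stepA sents mn mx) (prev :: rest)
      = (let fin := bs.foldl
            (stepB (List.scanl (fun acc s => acc + PySem.Str.len s) 0 sents) (sents.length : Int) mn mx)
            (rest, prev)
         fin.2 :: fin.1) := by
  induction bs generalizing prev rest with
  | nil => simp
  | cons b bs ih =>
    rw [List.foldl_cons, List.foldl_cons]
    by_cases h1 : pySliceLenSum sents b.1 b.2 < mn
    · by_cases h2 : pySliceLenSum sents prev.1 b.2 ≤ mx
      · have eA : stepA sents mn mx (prev :: rest) b = (prev.1, b.2) :: rest := by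
          simp only [stepA]; rw [if_pos h1, if_pos h2]
        have eB : stepB (List.scanl (fun acc s => acc + PySem.Str.len s) 0 sents)
            (sents.length : Int) mn mx (rest, prev) b = (rest, (prev.1, b.2)) := by
          simp only [stepB, altSeg_eq]; rw [if_pos ⟨h1, h2⟩]
        rw [eA, eB]; exact ih _ _
      · have eA : stepA sents mn mx (prev :: rest) b = b :: prev :: rest := by
          simp only [stepA]; rw [if_pos h1, if_neg h2]
        have eB : stepB (List.scanl (fun acc s => acc + PySem.Str.len s) 0 sents)
            (sents.length : Int) mn mx (rest, prev) b = (prev :: rest, b) := by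
          simp only [stepB, altSeg_eq]; rw [if_neg (by tauto)]
        rw [eA, eB]; exact ih _ _
    · have eA : stepA sents mn mx (prev :: rest) b = b :: prev :: rest := by
        simp only [stepA]; rw [if_neg h1]
      have eB : stepB (List.scanl (fun acc s => acc + PySem.Str.len s) 0 sents)
          (sents.length : Int) mn mx (rest, prev) b = (prev :: rest, b) := by
        simp only [stepB, altSeg_eq]; rw [if_neg (by tauto)]
      rw [eA, eB]; exact ih _ _

-- ===== VERDICT (by name: the statement is the Claim_ definition above) =====
theorem merge_small_py_spec : Claim_equal_merge_small_py := by
  intro sents bounds mn mx _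
  unfold Spec_merge_small_py
  cases bounds with
  | nil => rfl
  | cons b0 rest =>
    show (merge_small_py sents (b0 :: rest) mn mx) = _
    unfold merge_small_py merge_small_py_alt
    simp only [List.isEmpty_cons, Bool.false_eq_true, if_false, List.foldl_cons]
    have e0 : stepA sents mn mx [] b0 = [b0] := rfl
    rw [e0, loop_eq sents mn mx rest b0 []]
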